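-- pv_equiv track=rewrite | github.com/dhruvildarji/chess_bot | scripts/create_test_train.py | format_data_for_ml
-- ===== SOURCE A (Python) =====
-- def format_data_for_ml(games_data):
--     """Formats chess game data into a specific Input/Output format for ML model training."""
--     formatted_data = []
--     c = 0
--     for game_data in games_data:
--         parts = game_data.split("###")
--         moves_part = parts[1].strip() if len(parts) > 1 else ""
--         moves = moves_part.split(" ")[1:]  # Skip the game metadata, start with actual moves
--
--         for i in range(len(moves)):
--             input_sequence = " - ".join(moves[:i])
--             output_move = moves[i][2:] if i < len(moves) else ""
--             formatted_data.append((input_sequence, output_move))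
--         formatted_data.append(("new_game","new_game"))
--
--     return formatted_data
-- ===== SOURCE B (Python) =====
-- def format_data_for_ml(games_data):
--     """Formats chess game data into Input/Output pairs for ML training.
--
--     Single pass per game: maintains a running prefix string instead of
--     re-joining the slice moves[:i] for every i.
--     """
--     formatted = []
--     for game_data in games_data:
--         parts = game_data.split("###")
--         moves_part = parts[1].strip() if len(parts) > 1 else ""
--         moves = moves_part.split(" ")[1:]
--         if moves:
--             formatted.append(("", moves[0][2:]))
--             prefix = moves[0]
--             for move in moves[1:]:
--                 formatted.append((prefix, move[2:]))
--                 prefix = prefix + " - " + move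
--         formatted.append(("new_game", "new_game"))
--     return formatted
-- ===== Notes on version B (the rewrite author's own statement) =====
-- stated objective: alternative
-- what changed: Replaces A's inner index loop that re-slices and re-joins moves[:i] for every i with a single stateful pass over the moves that maintains a running prefix string (first move handled separately, then prefix += ' - ' + move).
import Mathlib
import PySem

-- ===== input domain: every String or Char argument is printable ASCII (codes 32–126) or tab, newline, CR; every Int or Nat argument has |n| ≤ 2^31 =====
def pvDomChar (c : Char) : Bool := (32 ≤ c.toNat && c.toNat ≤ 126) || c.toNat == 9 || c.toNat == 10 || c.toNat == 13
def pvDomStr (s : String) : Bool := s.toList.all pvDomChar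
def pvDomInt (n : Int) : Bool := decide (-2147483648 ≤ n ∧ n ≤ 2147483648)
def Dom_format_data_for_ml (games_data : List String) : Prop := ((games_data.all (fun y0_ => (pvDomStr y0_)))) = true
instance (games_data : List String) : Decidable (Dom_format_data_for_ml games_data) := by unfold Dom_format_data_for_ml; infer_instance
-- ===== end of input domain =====

-- B replaces the per-index slice+join of A's inner loop by a single pass that
-- maintains a running prefix string (objective: alternative decomposition; the
-- return values are identical).

-- ===== PORT A =====
def format_data_for_ml (games_data : List String) : List (String × String) :=
  games_data.foldl (fun formatted_data game_data =>
    let parts := (PySem.Str.split? game_data "###").getD []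
    let moves_part := if parts.length > 1 then PySem.Str.strip (PySem.List.pyGetD parts 1 "") else ""
    let moves := PySem.List.slice ((PySem.Str.split? moves_part " ").getD []) (some 1) none
    let formatted_data :=
      (PySem.List.pyRange 0 (moves.length : Int)).foldl (fun fd i =>
        let input_sequence := PySem.Str.join " - " (PySem.List.slice moves none (some i))
        let output_move := if i < (moves.length : Int) then
            PySem.Str.slice (PySem.List.pyGetD moves i "") (some 2) none
          else ""
        fd ++ [(input_sequence, output_move)]) formatted_data
    formatted_data ++ [("new_game", "new_game")]) []

-- ===== PORT B =====
def format_data_for_ml_alt (games_data : List String) : List (String × String) :=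
  games_data.foldl (fun formatted game_data =>
    let parts := (PySem.Str.split? game_data "###").getD []
    let moves_part := if parts.length > 1 then PySem.Str.strip (PySem.List.pyGetD parts 1 "") else ""
    let moves := ((PySem.Str.split? moves_part " ").getD []).tail
    let formatted :=
      match moves with
      | [] => formatted
      | m :: rest =>
        (rest.foldl
          (fun (st : List (String × String) × String) move =>
            (st.1 ++ [(st.2, PySem.Str.slice move (some 2) none)], st.2 ++ " - " ++ move))
          (formatted ++ [("", PySem.Str.slice m (some 2) none)], m)).1
    formatted ++ [("new_game", "new_game")]) []

-- ===== PRECONDITION & SPEC =====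
def Spec_format_data_for_ml (games_data : List String) (out : List (String × String)) : Prop := out = format_data_for_ml_alt games_data
instance (games_data : List String) (out : List (String × String)) : Decidable (Spec_format_data_for_ml games_data out) := by unfold Spec_format_data_for_ml; infer_instance

-- ===== CLAIM (what is proved, stated in full; the proofs are below) =====
def Claim_equal_format_data_for_ml : Prop := ∀ (games_data : List String), Dom_format_data_for_ml games_data → Spec_format_data_for_ml games_data (format_data_for_ml games_data)

-- ===== LEMMAS AND PROOFS =====

-- B's output pairs for the moves after the first, starting from prefix p.
def pvPairs (p : String) : List String → List (String × String)
  | [] => []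
  | m :: r => (p, PySem.Str.slice m (some 2) none) :: pvPairs (p ++ " - " ++ m) r

lemma pvJoinNil : PySem.Str.join " - " [] = "" := by
  apply String.toList_inj.mp
  rw [PySem.Str.toList_join]
  simp [PySem.Chars.join_nil]

lemma pvJoinSingleton (p : String) : PySem.Str.join " - " [p] = p := by
  apply String.toList_inj.mp
  rw [PySem.Str.toList_join]
  simp [PySem.Chars.join_singleton]

lemma pvJoinShift (p m : String) (xs : List String) :
    PySem.Str.join " - " (p :: m :: xs) = PySem.Str.join " - " ((p ++ " - " ++ m) :: xs) := by
  apply String.toList_inj.mp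
  rw [PySem.Str.toList_join, PySem.Str.toList_join]
  cases xs with
  | nil => simp [PySem.Chars.join_cons_cons, PySem.Chars.join_singleton]
  | cons y ys =>
      rw [List.map_cons, List.map_cons, List.map_cons, List.map_cons, List.map_cons,
        PySem.Chars.join_cons_cons, PySem.Chars.join_cons_cons, PySem.Chars.join_cons_cons]
      simp

-- B's inner fold produces exactly acc ++ pvPairs p rest.
lemma pvFoldB (rest : List String) : ∀ (acc : List (String × String)) (p : String),
    (rest.foldl
      (fun (st : List (String × String) × String) move =>
        (st.1 ++ [(st.2, PySem.Str.slice move (some 2) none)], st.2 ++ " - " ++ move))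
      (acc, p)).1 = acc ++ pvPairs p rest := by
  induction rest with
  | nil => intro acc p; simp [pvPairs]
  | cons m r ih =>
      intro acc p
      simp only [List.foldl_cons, pvPairs]
      rw [ih]
      simp

-- A's per-index (join of prefix-slice) entries coincide with pvPairs.
lemma pvRangeMap (rest : List String) : ∀ (p : String),
    (List.range rest.length).map
      (fun k => (PySem.Str.join " - " (p :: rest.take k),
                 PySem.Str.slice (rest.getD k "") (some 2) none)) = pvPairs p rest := by
  induction rest with
  | nil => intro p; simp [pvPairs]
  | cons m r ih =>
      intro p
      rw [List.length_cons, List.range_succ_eq_map, List.map_cons, List.map_map]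
      simp only [List.take_zero, List.getD_cons_zero, pvPairs, pvJoinSingleton]
      congr 1
      rw [← ih (p ++ " - " ++ m)]
      apply List.map_congr_left
      intro k _
      simp only [Function.comp_apply, List.take_succ_cons, List.getD_cons_succ]
      rw [pvJoinShift]

-- The per-game transformed pairs, as B computes them.
def pvGamePairs (moves : List String) : List (String × String) :=
  match moves with
  | [] => []
  | m :: rest => ("", PySem.Str.slice m (some 2) none) :: pvPairs m rest

-- A's inner loop equals acc ++ pvGamePairs moves.
lemma pvInnerA (moves : List String) (acc : List (String × String)) :
    (PySem.List.pyRange 0 (moves.length : Int)).foldl (fun fd i =>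
        fd ++ [(PySem.Str.join " - " (PySem.List.slice moves none (some i)),
                if i < (moves.length : Int) then
                  PySem.Str.slice (PySem.List.pyGetD moves i "") (some 2) none
                else "")]) acc
      = acc ++ pvGamePairs moves := by
  rw [PySem.List.foldl_append_singleton_eq_map, PySem.List.pyRange_zero_natCast, List.map_map]
  congr 1
  have h : ∀ k ∈ List.range moves.length,
      ((fun i => (PySem.Str.join " - " (PySem.List.slice moves none (some i)),
                if i < (moves.length : Int) then
                  PySem.Str.slice (PySem.List.pyGetD moves i "") (some 2) none
                else "")) ∘ (fun k : Nat => (k : Int))) k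
      = (PySem.Str.join " - " (moves.take k),
         PySem.Str.slice (moves.getD k "") (some 2) none) := by
    intro k hk
    have hk' : k < moves.length := List.mem_range.mp hk
    simp only [Function.comp_apply, PySem.List.slice_to_natCast, PySem.List.pyGetD_natCast]
    rw [if_pos (by exact_mod_cast hk')]
  rw [List.map_congr_left h]
  cases moves with
  | nil => simp [pvGamePairs]
  | cons m r =>
      rw [List.length_cons, List.range_succ_eq_map, List.map_cons, List.map_map]
      simp only [List.take_zero, pvGamePairs, pvJoinNil, List.getD_cons_zero]
      congr 1
      rw [← pvRangeMap r m]
      apply List.map_congr_left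
      intro k _
      simp [Function.comp_apply, List.take_succ_cons]

-- The two per-game bodies agree, for any split result ms.
lemma pvGameEq (acc : List (String × String)) (ms : List String) :
    ((PySem.List.pyRange 0 ((PySem.List.slice ms (some 1) none).length : Int)).foldl (fun fd i =>
        fd ++ [(PySem.Str.join " - " (PySem.List.slice (PySem.List.slice ms (some 1) none) none (some i)),
                if i < ((PySem.List.slice ms (some 1) none).length : Int) then
                  PySem.Str.slice (PySem.List.pyGetD (PySem.List.slice ms (some 1) none) i "") (some 2) none
                else "")]) acc) ++ [("new_game", "new_game")]
    = (match ms.tail with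
       | [] => acc
       | m :: rest =>
         (rest.foldl
           (fun (st : List (String × String) × String) move =>
             (st.1 ++ [(st.2, PySem.Str.slice move (some 2) none)], st.2 ++ " - " ++ move))
           (acc ++ [("", PySem.Str.slice m (some 2) none)], m)).1) ++ [("new_game", "new_game")] := by
  rw [PySem.List.slice_from_one, pvInnerA]
  cases ms.tail with
  | nil => simp [pvGamePairs]
  | cons m rest =>
      simp [pvGamePairs, pvFoldB]

-- ===== VERDICT (by name: the statement is the Claim_ definition above) =====
theorem format_data_for_ml_spec : Claim_equal_format_data_for_ml := by
  intro games_data _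
  unfold Spec_format_data_for_ml format_data_for_ml format_data_for_ml_alt
  apply PySem.List.foldl_congr_mem
  intro acc g _
  dsimp only
  exact pvGameEq acc _
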